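-- pv_equiv track=rewrite | github.com/JakaMale/p1 | Naloge/naloga5.py | najbolj_napaden
-- ===== SOURCE A (Python) =====
-- def najbolj_napaden(topovi):
--     if not topovi:
--         return None
--     naj_top_num=0
--     trenutni_top=0
--     naj_top_cor=""
--     for a in topovi:
--         trenutni_top = 0
--         for b in topovi:
--             if a[0] == b[0] or a[1] == b[1] and b != a:
--                trenutni_top+=1
--                if naj_top_num< trenutni_top:
--                    naj_top_num=trenutni_top
--                    naj_top_cor=a
--     if naj_top_num!=1:
--         return naj_top_cor
-- ===== SOURCE B (Python) =====
-- def najbolj_napaden(topovi):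
--     if not topovi:
--         return None
--     col = {}
--     row = {}
--     cell = {}
--     for t in topovi:
--         k0, k1 = t[0], t[1]
--         col[k0] = col.get(k0, 0) + 1
--         row[k1] = row.get(k1, 0) + 1
--         cell[(k0, k1)] = cell.get((k0, k1), 0) + 1
--     best_n = 0
--     best = None
--     for t in topovi:
--         n = col[t[0]] + row[t[1]] - cell[(t[0], t[1])]
--         if n > best_n:
--             best_n = n
--             best = t
--     return best if best_n != 1 else None
-- ===== Notes on version B (the rewrite author's own statement) =====
-- stated objective: faster
-- what changed: replaces A's O(n^2) all-pairs double loop with one pass building first-char/second-char/char-pair count dicts and computing each tower's attack count by inclusion-exclusion, then a single first-argmax pass; Pre_ excludes lists containing a string shorter than 2 characters, on which A may raise IndexError (and B always raises).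
-- outside the precondition, e.g. on najbolj_napaden(['a']): A returns None, B raises IndexError; on najbolj_napaden(['a', 'ab']): A returns 'a', B raises IndexError
import Mathlib
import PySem

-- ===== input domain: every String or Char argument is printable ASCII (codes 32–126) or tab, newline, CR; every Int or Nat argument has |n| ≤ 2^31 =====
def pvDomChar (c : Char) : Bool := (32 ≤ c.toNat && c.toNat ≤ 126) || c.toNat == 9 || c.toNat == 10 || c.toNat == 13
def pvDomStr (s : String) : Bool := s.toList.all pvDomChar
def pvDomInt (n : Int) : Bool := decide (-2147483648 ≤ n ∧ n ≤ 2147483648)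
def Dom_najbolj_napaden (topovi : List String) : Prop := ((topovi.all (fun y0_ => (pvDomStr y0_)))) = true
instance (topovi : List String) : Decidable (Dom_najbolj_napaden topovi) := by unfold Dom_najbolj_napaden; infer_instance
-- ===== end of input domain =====

-- B replaces A's O(n^2) all-pairs scan by one counting pass over three dicts plus
-- an inclusion/exclusion count and a single first-argmax pass (asymptotically faster).


-- ===== PORT A =====
-- s[i] for a string; total form (Pre_ guarantees the index is in range wherever it is used)
def pvC (s : String) (i : Int) : Char := (PySem.Str.pyGet? s i).getD ' '

def najbolj_napaden (topovi : List String) : Option String :=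
  if topovi = [] then
    none
  else
    let st := topovi.foldl (fun (st : Int × String) a =>
      let inner := topovi.foldl (fun (s : Int × Int × String) b =>
        if pvC a 0 == pvC b 0 || (pvC a 1 == pvC b 1 && b != a) then
          let t := s.1 + 1
          if s.2.1 < t then (t, t, a) else (t, s.2.1, s.2.2)
        else s) ((0 : Int), st.1, st.2)
      (inner.2.1, inner.2.2)) ((0 : Int), "")
    if st.1 ≠ 1 then some st.2 else none

-- ===== PORT B =====
def najbolj_napaden_alt (topovi : List String) : Option String :=
  if topovi = [] then
    none
  else
    let ds := topovi.foldl
      (fun (d : PySem.Dict Char Int × PySem.Dict Char Int × PySem.Dict (Char × Char) Int) t =>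
        (d.1.insert (pvC t 0) (d.1.getD (pvC t 0) 0 + 1),
         d.2.1.insert (pvC t 1) (d.2.1.getD (pvC t 1) 0 + 1),
         d.2.2.insert (pvC t 0, pvC t 1) (d.2.2.getD (pvC t 0, pvC t 1) 0 + 1)))
      (PySem.Dict.empty, PySem.Dict.empty, PySem.Dict.empty)
    let r := topovi.foldl (fun (st : Int × Option String) t =>
        let n := ds.1.getD (pvC t 0) 0 + ds.2.1.getD (pvC t 1) 0 - ds.2.2.getD (pvC t 0, pvC t 1) 0
        if n > st.1 then (n, some t) else st)
      ((0 : Int), (none : Option String))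
    if r.1 ≠ 1 then r.2 else none

-- ===== PRECONDITION & SPEC =====
-- Pre_ excludes lists containing a string shorter than 2 characters: there Python A may
-- raise IndexError on a[1]/b[1] (and B always raises); everything else is admitted.
def Pre_najbolj_napaden (topovi : List String) : Prop := ∀ s ∈ topovi, 2 ≤ PySem.Str.len s
instance (topovi : List String) : Decidable (Pre_najbolj_napaden topovi) := by unfold Pre_najbolj_napaden; infer_instance

def pvWitness_najbolj_napaden : List String := ["a1", "a2", "b2"]

def Spec_najbolj_napaden (topovi : List String) (out : Option String) : Prop := out = najbolj_napaden_alt topovi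
instance (topovi : List String) (out : Option String) : Decidable (Spec_najbolj_napaden topovi out) := by unfold Spec_najbolj_napaden; infer_instance

-- ===== CLAIM (what is proved, stated in full; the proofs are below) =====
def Claim_equal_najbolj_napaden : Prop := ∀ (topovi : List String), Dom_najbolj_napaden topovi → Pre_najbolj_napaden topovi → Spec_najbolj_napaden topovi (najbolj_napaden topovi)

-- ===== LEMMAS AND PROOFS =====

-- the number of towers b that share a's first or second character
def pvCnt (topovi : List String) (a : String) : Int :=
  (topovi.countP (fun b => pvC b 0 == pvC a 0 || pvC b 1 == pvC a 1) : Int)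

-- A's inner test equals the symmetric "same column or same row" test (the 'b != a'
-- conjunct is redundant: b = a forces equal first characters)
lemma pv_test_eq (a b : String) :
    (pvC a 0 == pvC b 0 || (pvC a 1 == pvC b 1 && b != a))
      = (pvC b 0 == pvC a 0 || pvC b 1 == pvC a 1) := by
  by_cases h0 : pvC a 0 = pvC b 0
  · simp [h0]
  · have hne : b ≠ a := fun h => h0 (by rw [h])
    rw [Bool.eq_iff_iff]
    simp [h0, Ne.symm h0, hne]
    exact eq_comm

-- inclusion–exclusion for countP over a Bool disjunction
lemma pv_countP_or (l : List String) (p q : String → Bool) :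
    l.countP (fun b => p b || q b) + l.countP (fun b => p b && q b)
      = l.countP p + l.countP q := by
  induction l with
  | nil => simp
  | cons x t ih =>
    simp only [List.countP_cons]
    cases hp : p x <;> cases hq : q x <;> simp [*] <;> omega

-- a fold over a triple of independent accumulators is three folds
lemma pv_foldl_triple {α β γ δ : Type} (f : α → δ → α) (g : β → δ → β) (h : γ → δ → γ)
    (l : List δ) (a : α) (b : β) (c : γ) :
    l.foldl (fun s e => (f s.1 e, g s.2.1 e, h s.2.2 e)) (a, b, c)
      = (l.foldl f a, l.foldl g b, l.foldl h c) := by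
  induction l generalizing a b c with
  | nil => rfl
  | cons x t ih => simpa using ih (f a x) (g b x) (h c x)

-- B's counting-dict lookup is a count over the list
lemma pv_getD_keyed {κ : Type} [BEq κ] [LawfulBEq κ] (l : List String) (key : String → κ) (v : κ) :
    (l.foldl (fun (d : PySem.Dict κ Int) t => d.insert (key t) (d.getD (key t) 0 + 1)) PySem.Dict.empty).getD v 0
      = (l.countP (fun b => key b == v) : Int) := by
  rw [← List.foldl_map (f := key)
      (g := fun (d : PySem.Dict κ Int) x => d.insert x (d.getD x 0 + 1))]
  rw [PySem.Dict.getD_foldl_insert_add_one]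
  simp [List.count, List.countP_map]
  rfl

-- A's inner loop from state (t, n, c) with t ≤ n computes (t + k, max n (t + k), new argmax)
lemma pv_innerA (a : String) :
    ∀ (l : List String) (t n : Int) (c : String), t ≤ n →
    l.foldl (fun (s : Int × Int × String) b =>
        if pvC a 0 == pvC b 0 || (pvC a 1 == pvC b 1 && b != a) then
          let t := s.1 + 1
          if s.2.1 < t then (t, t, a) else (t, s.2.1, s.2.2)
        else s) (t, n, c)
      = (t + (l.countP (fun b => pvC a 0 == pvC b 0 || (pvC a 1 == pvC b 1 && b != a)) : Int),
         max n (t + (l.countP (fun b => pvC a 0 == pvC b 0 || (pvC a 1 == pvC b 1 && b != a)) : Int)),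
         if n < t + (l.countP (fun b => pvC a 0 == pvC b 0 || (pvC a 1 == pvC b 1 && b != a)) : Int) then a else c) := by
  intro l
  induction l with
  | nil => intro t n c h; simp; omega
  | cons x xs ih =>
    intro t n c h
    simp only [List.foldl_cons, List.countP_cons]
    have hk : (0:Int) ≤ ((xs.countP (fun b => pvC a 0 == pvC b 0 || (pvC a 1 == pvC b 1 && b != a)) : Nat) : Int) :=
      Int.natCast_nonneg _
    by_cases hx : (pvC a 0 == pvC x 0 || (pvC a 1 == pvC x 1 && x != a)) = true
    · simp only [hx, if_pos]
      by_cases hn : n < t + 1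
      · have hn' : n = t := by omega
        subst hn'
        rw [if_pos hn, ih (n + 1) (n + 1) a (le_refl _)]
        push_cast
        rw [show n + 1 + ((xs.countP (fun b => pvC a 0 == pvC b 0 || (pvC a 1 == pvC b 1 && b != a)) : Nat) : Int)
              = n + (((xs.countP (fun b => pvC a 0 == pvC b 0 || (pvC a 1 == pvC b 1 && b != a)) : Nat) : Int) + 1) from by ring]
        rw [max_eq_right (by omega), max_eq_right (by omega), ite_self, if_pos (by omega)]
      · rw [if_neg hn, ih (t + 1) n c (by omega)]
        push_cast
        rw [show t + 1 + ((xs.countP (fun b => pvC a 0 == pvC b 0 || (pvC a 1 == pvC b 1 && b != a)) : Nat) : Int)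
              = t + (((xs.countP (fun b => pvC a 0 == pvC b 0 || (pvC a 1 == pvC b 1 && b != a)) : Nat) : Int) + 1) from by ring]
    · simp only [hx, if_neg, Bool.false_eq_true, not_false_iff]
      rw [ih t n c h]
      simp

-- A's running (max, argmax-string) pair and B's running (max, argmax-option) pair
-- agree once the running max is positive
lemma pv_main (cnt : String → Int) :
    ∀ (l : List String) (n : Int) (c : String), 0 < n →
    (l.foldl (fun (st : Int × String) a =>
        (max st.1 (cnt a), if st.1 < cnt a then a else st.2)) (n, c)).1
      = (l.foldl (fun (st : Int × Option String) a =>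
          if cnt a > st.1 then (cnt a, some a) else st) (n, some c)).1
    ∧ (l.foldl (fun (st : Int × Option String) a =>
          if cnt a > st.1 then (cnt a, some a) else st) (n, some c)).2
      = some ((l.foldl (fun (st : Int × String) a =>
          (max st.1 (cnt a), if st.1 < cnt a then a else st.2)) (n, c)).2) := by
  intro l
  induction l with
  | nil => intro n c h; exact ⟨rfl, rfl⟩
  | cons x xs ih =>
    intro n c h
    simp only [List.foldl_cons]
    by_cases hx : n < cnt x
    · rw [if_pos (by omega : cnt x > n), max_eq_right (le_of_lt hx), if_pos hx]
      exact ih (cnt x) x (lt_trans h hx)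
    · rw [if_neg (by omega : ¬ cnt x > n), max_eq_left (by omega), if_neg hx]
      exact ih n c h

lemma pv_cntA (topovi : List String) (x : String) :
    ((topovi.countP (fun b => pvC x 0 == pvC b 0 || (pvC x 1 == pvC b 1 && b != x)) : Nat) : Int)
      = pvCnt topovi x := by
  unfold pvCnt
  congr 1
  exact List.countP_congr (fun b _ => by rw [pv_test_eq x b])

-- A computes a running strict-argmax of pvCnt
lemma pv_outerA (topovi : List String) :
    ∀ (m : List String) (n : Int) (c : String), 0 ≤ n →
    m.foldl (fun (st : Int × String) a =>
      let inner := topovi.foldl (fun (s : Int × Int × String) b =>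
          if pvC a 0 == pvC b 0 || (pvC a 1 == pvC b 1 && b != a) then
            let t := s.1 + 1
            if s.2.1 < t then (t, t, a) else (t, s.2.1, s.2.2)
          else s) ((0 : Int), st.1, st.2)
      (inner.2.1, inner.2.2)) (n, c)
    = m.foldl (fun (st : Int × String) a =>
        (max st.1 (pvCnt topovi a), if st.1 < pvCnt topovi a then a else st.2)) (n, c) := by
  intro m
  induction m with
  | nil => intro n c h; rfl
  | cons y m ih =>
    intro n c h
    simp only [List.foldl_cons]
    rw [pv_innerA y topovi 0 n c h]
    simp only [zero_add, pv_cntA]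
    exact ih (max n (pvCnt topovi y)) _ (le_trans h (le_max_left _ _))

-- A as a strict-argmax fold of pvCnt
lemma pvA_eq (topovi : List String) :
    najbolj_napaden topovi
      = (if topovi = [] then none else
         let r := topovi.foldl (fun (st : Int × String) a =>
             (max st.1 (pvCnt topovi a), if st.1 < pvCnt topovi a then a else st.2)) ((0 : Int), "")
         if r.1 ≠ 1 then some r.2 else none) := by
  unfold najbolj_napaden
  by_cases hnil : topovi = []
  · simp [hnil]
  · rw [if_neg hnil, if_neg hnil]
    rw [pv_outerA topovi topovi 0 "" (le_refl 0)]

-- B as the same strict-argmax fold of pvCnt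
lemma pvB_eq (topovi : List String) :
    najbolj_napaden_alt topovi
      = (if topovi = [] then none else
         let r := topovi.foldl (fun (st : Int × Option String) a =>
             if pvCnt topovi a > st.1 then (pvCnt topovi a, some a) else st) ((0 : Int), (none : Option String))
         if r.1 ≠ 1 then r.2 else none) := by
  unfold najbolj_napaden_alt
  by_cases hnil : topovi = []
  · simp [hnil]
  · rw [if_neg hnil, if_neg hnil]
    simp only []
    rw [pv_foldl_triple
        (f := fun (d : PySem.Dict Char Int) t => d.insert (pvC t 0) (d.getD (pvC t 0) 0 + 1))
        (g := fun (d : PySem.Dict Char Int) t => d.insert (pvC t 1) (d.getD (pvC t 1) 0 + 1))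
        (h := fun (d : PySem.Dict (Char × Char) Int) t => d.insert (pvC t 0, pvC t 1) (d.getD (pvC t 0, pvC t 1) 0 + 1))]
    have hfun : (fun (st : Int × Option String) t =>
        if (topovi.foldl (fun (d : PySem.Dict Char Int) t => d.insert (pvC t 0) (d.getD (pvC t 0) 0 + 1)) PySem.Dict.empty).getD (pvC t 0) 0
           + (topovi.foldl (fun (d : PySem.Dict Char Int) t => d.insert (pvC t 1) (d.getD (pvC t 1) 0 + 1)) PySem.Dict.empty).getD (pvC t 1) 0
           - (topovi.foldl (fun (d : PySem.Dict (Char × Char) Int) t => d.insert (pvC t 0, pvC t 1) (d.getD (pvC t 0, pvC t 1) 0 + 1)) PySem.Dict.empty).getD (pvC t 0, pvC t 1) 0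
           > st.1
        then ((topovi.foldl (fun (d : PySem.Dict Char Int) t => d.insert (pvC t 0) (d.getD (pvC t 0) 0 + 1)) PySem.Dict.empty).getD (pvC t 0) 0
           + (topovi.foldl (fun (d : PySem.Dict Char Int) t => d.insert (pvC t 1) (d.getD (pvC t 1) 0 + 1)) PySem.Dict.empty).getD (pvC t 1) 0
           - (topovi.foldl (fun (d : PySem.Dict (Char × Char) Int) t => d.insert (pvC t 0, pvC t 1) (d.getD (pvC t 0, pvC t 1) 0 + 1)) PySem.Dict.empty).getD (pvC t 0, pvC t 1) 0, some t)
        else st)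
      = (fun (st : Int × Option String) t =>
          if pvCnt topovi t > st.1 then (pvCnt topovi t, some t) else st) := by
      funext st t
      rw [pv_getD_keyed topovi (fun b => pvC b 0) (pvC t 0),
          pv_getD_keyed topovi (fun b => pvC b 1) (pvC t 1),
          pv_getD_keyed topovi (fun b => (pvC b 0, pvC b 1)) (pvC t 0, pvC t 1)]
      have hprod : (topovi.countP (fun b => (pvC b 0, pvC b 1) == (pvC t 0, pvC t 1)))
          = topovi.countP (fun b => (pvC b 0 == pvC t 0) && (pvC b 1 == pvC t 1)) := by
        refine List.countP_congr (fun b _ => ?_)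
        rfl
      have hie := pv_countP_or topovi (fun b => pvC b 0 == pvC t 0) (fun b => pvC b 1 == pvC t 1)
      have hcnt : (topovi.countP (fun b => pvC b 0 == pvC t 0) : Int)
            + (topovi.countP (fun b => pvC b 1 == pvC t 1) : Int)
            - (topovi.countP (fun b => (pvC b 0, pvC b 1) == (pvC t 0, pvC t 1)) : Int)
          = pvCnt topovi t := by
        unfold pvCnt
        rw [hprod]
        omega
      rw [hcnt]
    rw [hfun]

-- ===== VERDICT (by name: the statement is the Claim_ definition above) =====
theorem najbolj_napaden_spec : Claim_equal_najbolj_napaden := by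
  intro topovi hdom hpre
  unfold Spec_najbolj_napaden
  rw [pvA_eq, pvB_eq]
  cases topovi with
  | nil => rfl
  | cons a l =>
    have hnil : (a :: l) ≠ ([] : List String) := by simp
    rw [if_neg hnil, if_neg hnil]
    simp only [List.foldl_cons]
    have hpos : 0 < pvCnt (a :: l) a := by
      unfold pvCnt
      have : 0 < (a :: l).countP (fun b => pvC b 0 == pvC a 0 || pvC b 1 == pvC a 1) := by
        rw [List.countP_pos_iff]
        exact ⟨a, List.mem_cons_self, by simp⟩
      omega
    rw [if_pos (by omega : pvCnt (a :: l) a > 0), max_eq_right (le_of_lt hpos), if_pos hpos]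
    obtain ⟨h1, h2⟩ := pv_main (pvCnt (a :: l)) l (pvCnt (a :: l) a) a hpos
    rw [← h1, h2]
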